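-- pv_equiv track=rewrite | github.com/Cbkhare/Challenges | CC_Aug20_SKMP.py | solve
-- ===== SOURCE A (Python) =====
-- def pre_dict(a):
--     d = {}
--     for c in a:
--         d[c] = d.get(c, 0) + 1
--     return d
--
-- def solve(s, p):
--     sd = pre_dict(s)
--     sp = pre_dict(p)
--     for c in sp:
--         sd[c] -= sp[c]
--         if sd[c] == 0:
--             del sd[c]
--     if len(sd) == 0:
--         return p
--     pre = ''
--     del_list = []
--     mn = True
--     for i in range(1, len(p)):
--         if ord(p[i]) == ord(p[i-1]):
--             continue
--         if ord(p[i]) < ord(p[i-1]):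
--             mn = False
--         break
--     for k, v in sd.items():
--         if mn:
--             if ord(k) <= ord(p[0]):
--                 pre += k*v
--                 del_list.append(k)
--         else:
--             if ord(k) < ord(p[0]):
--                 pre += k*v
--                 del_list.append(k)
--     for d in del_list:
--         del sd[d]
--     suf = ''
--     for k, v in sd.items():
--         suf += k*v
--     return ''.join(sorted(pre)) + p + ''.join(sorted(suf))
-- ===== SOURCE B (Python) =====
-- def solve(s, p):
--     # leftover multiset = sorted(s) minus sorted(p), by a two-pointer merge subtraction
--     ss = sorted(s)
--     pp = sorted(p)
--     rest = []
--     i = j = 0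
--     while i < len(ss):
--         if j < len(pp) and ss[i] == pp[j]:
--             i += 1
--             j += 1
--         elif j < len(pp) and pp[j] < ss[i]:
--             j += 1
--         else:
--             rest.append(ss[i])
--             i += 1
--     if not rest:
--         return p
--     key = p[0]
--     mn = p >= key * len(p)
--     lo, hi = 0, len(rest)
--     while lo < hi:
--         mid = (lo + hi) // 2
--         if rest[mid] < key or (mn and rest[mid] == key):
--             lo = mid + 1
--         else:
--             hi = mid
--     return ''.join(rest[:lo]) + p + ''.join(rest[lo:])
-- ===== Notes on version B (the rewrite author's own statement) =====
-- stated objective: alternative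
-- what changed: B drops the dict counting entirely: it sorts s and p and computes the leftover multiset by a two-pointer merge subtraction of the two sorted lists, derives the tie-break flag by a single string comparison p >= p[0]*len(p) instead of A's first-strict-change scan, and places p by binary search for the partition point in the already-sorted remainder, where A scans dict items twice, deletes keys, and sorts prefix and suffix separately.
import Mathlib
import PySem

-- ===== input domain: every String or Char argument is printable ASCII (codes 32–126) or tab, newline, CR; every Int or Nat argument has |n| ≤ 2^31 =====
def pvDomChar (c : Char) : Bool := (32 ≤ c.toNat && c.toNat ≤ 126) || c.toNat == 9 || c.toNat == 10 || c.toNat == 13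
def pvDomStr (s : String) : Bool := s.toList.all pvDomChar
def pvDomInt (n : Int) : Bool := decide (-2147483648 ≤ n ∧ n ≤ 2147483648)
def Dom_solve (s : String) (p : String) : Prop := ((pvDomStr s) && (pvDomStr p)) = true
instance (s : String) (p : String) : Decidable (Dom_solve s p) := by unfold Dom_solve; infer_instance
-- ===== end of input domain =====

-- B drops the dict counting: sorted s minus sorted p by a two-pointer merge, the tie-break
-- flag by one string comparison, and the split point by binary search (objective: alternative).

-- ===== PORT A =====
def preDict (a : String) : PySem.Dict Char Int :=
  a.toList.foldl (fun d c => d.insert c (d.getD c 0 + 1)) (PySem.Dict.empty : PySem.Dict Char Int)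

-- the 'for i in range(1, len(p))' loop with its two breaks, as structural recursion
def mnLoop : Char → List Char → Bool
  | _, [] => true
  | prev, c :: rest =>
    if c.toNat = prev.toNat then mnLoop c rest
    else if c.toNat < prev.toNat then false
    else true

def solve (s : String) (p : String) : String :=
  let sd := preDict s
  let sp := preDict p
  -- 'sd[c] -= sp[c]': KeyError when c ∉ sd — such inputs are outside Pre_solve; getD 0 stands in
  let sd := sp.keys.foldl (fun d c =>
      let v := d.getD c 0 - sp.getD c 0
      if v = 0 then d.erase c else d.insert c v) sd
  if sd.items = [] then p
  else
    let mn := match p.toList with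
      | [] => true
      | c0 :: tl => mnLoop c0 tl
    let p0 := p.toList.headD ' '   -- p[0]; IndexError when p = "" (outside Pre_solve)
    -- the pre/del_list loop; 'k*v' is empty for v ≤ 0, exactly as in Python
    let pd := sd.items.foldl (fun (acc : List Char × List Char) kv =>
        if (if mn then kv.1.toNat ≤ p0.toNat else kv.1.toNat < p0.toNat)
        then (acc.1 ++ List.replicate kv.2.toNat kv.1, acc.2 ++ [kv.1])
        else acc) ([], [])
    let sd := pd.2.foldl (fun d k => d.erase k) sd
    let suf := sd.items.foldl (fun acc kv => acc ++ List.replicate kv.2.toNat kv.1) []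
    String.ofList (PySem.List.sorted pd.1 (fun c => c) false ++ p.toList ++
               PySem.List.sorted suf (fun c => c) false)

-- ===== PORT B =====
-- the 'while i < len(ss)' two-pointer merge subtraction; fuel is a totality guard only
-- (any fuel >= len(ss)+len(pp) is never exhausted)
def subSorted : Nat → List Char → List Char → List Char
  | _, [], _ => []
  | 0, x, _ => x
  | fuel + 1, a :: x, [] => a :: subSorted fuel x []
  | fuel + 1, a :: x, b :: y =>
    if a = b then subSorted fuel x y
    else if b < a then subSorted fuel (a :: x) y
    else a :: subSorted fuel x (b :: y)

-- Python's string '>='  (lexicographic on code points), hand-ported; exact on all char lists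
def strGe : List Char → List Char → Bool
  | _, [] => true
  | [], _ :: _ => false
  | a :: x, b :: y => if a = b then strGe x y else decide (b < a)

-- the 'while lo < hi' binary-search loop; fuel is a totality guard only (hi - lo ≤ fuel)
def bsLoop (rest : List Char) (key : Char) (mn : Bool) : Nat → Nat → Nat → Nat
  | 0, lo, _ => lo
  | fuel + 1, lo, hi =>
    if lo < hi then
      let mid := (lo + hi) / 2
      if rest.getD mid ' ' < key || (mn && rest.getD mid ' ' == key) then
        bsLoop rest key mn fuel (mid + 1) hi
      else
        bsLoop rest key mn fuel lo mid
    else lo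

def solve_alt (s : String) (p : String) : String :=
  let ss := PySem.List.sorted s.toList (fun c => c) false
  let pp := PySem.List.sorted p.toList (fun c => c) false
  let rest := subSorted (ss.length + pp.length) ss pp
  if rest = [] then p
  else
    match p.toList with
    | [] => ""   -- Python raises IndexError on p[0] here (outside Pre_solve)
    | key :: _ =>
      let mn := strGe p.toList (List.replicate p.toList.length key)   -- p >= key*len(p)
      let lo := bsLoop rest key mn rest.length 0 rest.length
      String.ofList (rest.take lo ++ p.toList ++ rest.drop lo)

-- ===== PRECONDITION & SPEC =====
-- Pre_ excludes exactly the inputs on which A raises: a char of p missing from s (KeyError)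
-- and p empty while s is non-empty (IndexError on p[0]).
def Pre_solve (s : String) (p : String) : Prop :=
  (p.toList.all (fun c => s.toList.contains c)) = true ∧ (p.toList = [] → s.toList = [])
instance (s : String) (p : String) : Decidable (Pre_solve s p) := by
  unfold Pre_solve; infer_instance
def pvWitness_solve : String × String := ("ab", "a")

def Spec_solve (s : String) (p : String) (out : String) : Prop := out = solve_alt s p
instance (s : String) (p : String) (out : String) : Decidable (Spec_solve s p out) := by
  unfold Spec_solve; infer_instance

-- ===== CLAIM (what is proved, stated in full; the proofs are below) =====
def Claim_equal_solve : Prop := ∀ (s : String) (p : String), Dom_solve s p → Pre_solve s p → Spec_solve s p (solve s p)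

-- ===== LEMMAS AND PROOFS =====

-- the canonical remaining multiset, as A's dict pass produces it (proof-only helper)
def restOf (S P : List Char) : List Char :=
  ((PySem.List.sorted (PySem.Set.ofList S) (fun c => c) false).filter
      (fun k => decide (0 < (S.count k : Int) - (P.count k : Int)))).flatMap
    (fun k => List.replicate ((S.count k : Int) - (P.count k : Int)).toNat k)

theorem sdA_items (ks : List Char) (m : Char → Int) (d : PySem.Dict Char Int)
    (hnd : d.keys.Nodup) (hks : ks.Nodup) (hc : ∀ c ∈ ks, d.contains c = true) :
    (ks.foldl (fun d c =>
        if d.getD c 0 - m c = 0 then d.erase c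
        else d.insert c (d.getD c 0 - m c)) d).items
      = d.items.filterMap (fun q =>
          if q.1 ∈ ks then (if q.2 - m q.1 = 0 then none else some (q.1, q.2 - m q.1))
          else some q) := by
  induction ks generalizing d with
  | nil => simp
  | cons c ks' ih =>
    have hcc : d.contains c = true := hc c (by simp)
    have hcmem : c ∉ ks' := (List.nodup_cons.mp hks).1
    have hks' : ks'.Nodup := (List.nodup_cons.mp hks).2
    by_cases hv : d.getD c 0 - m c = 0
    · -- erase branch
      have herase : (d.erase c).items = d.items.filter (fun p => !(p.1 == c)) := rfl
      have h1 : (d.erase c).keys.Nodup := by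
        have : (d.erase c).keys.Sublist d.keys := by
          simp only [PySem.Dict.keys, herase]
          exact List.filter_sublist.map _
        exact this.nodup hnd
      have h2 : ∀ c' ∈ ks', (d.erase c).contains c' = true := by
        intro c' hc'
        have hne : c' ≠ c := fun hh => hcmem (hh ▸ hc')
        obtain ⟨x, hx, hxc⟩ := List.any_eq_true.mp (hc c' (by simp [hc']))
        refine List.any_eq_true.mpr ⟨x, List.mem_filter.mpr ⟨hx, ?_⟩, hxc⟩
        have : x.1 = c' := by simpa using hxc
        simp [this, hne]
      rw [List.foldl_cons, if_pos hv, ih _ h1 hks' h2, herase, List.filterMap_filter]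
      apply List.filterMap_congr
      intro q hq
      by_cases h : q.1 = c
      · have hget : d.getD q.1 0 = q.2 := PySem.Dict.getD_of_mem_items d (by simpa using hq) hnd 0
        have : q.2 - m q.1 = 0 := by rw [← hget, h] at *; exact hv
        simp [h]
        exact h ▸ this
      · simp [h, Ne.symm h]
    · -- insert branch
      have h1 : (d.insert c (d.getD c 0 - m c)).keys.Nodup := PySem.Dict.nodup_keys_insert _ _ _ hnd
      have h2 : ∀ c' ∈ ks', (d.insert c (d.getD c 0 - m c)).contains c' = true := by
        intro c' hc'
        rw [PySem.Dict.contains_insert]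
        simp [hc c' (by simp [hc'])]
      rw [List.foldl_cons, if_neg hv, ih _ h1 hks' h2,
          PySem.Dict.items_insert_of_contains d _ hcc, List.filterMap_map]
      apply List.filterMap_congr
      intro q hq
      by_cases h : q.1 = c
      · have hget : d.getD q.1 0 = q.2 := PySem.Dict.getD_of_mem_items d (by simpa using hq) hnd 0
        have hv2 : q.2 - m q.1 ≠ 0 := by rw [← hget]; rw [h] at *; exact hv
        simp [Function.comp, h, hcmem, hv2, ← hget]
        exact hv
      · simp [Function.comp, h, Ne.symm h]

theorem eraseFold_items (ks : List Char) (d : PySem.Dict Char Int) :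
    (ks.foldl (fun d k => d.erase k) d).items
      = d.items.filter (fun kv => !ks.contains kv.1) := by
  induction ks generalizing d with
  | nil => simp
  | cons c ks ih =>
    rw [List.foldl_cons, ih]
    have : (d.erase c).items = d.items.filter (fun p => !(p.1 == c)) := rfl
    rw [this, List.filter_filter]
    apply List.filter_congr
    intro kv _
    by_cases h : kv.1 = c <;> simp [h]

theorem expand_filterMap (D : List Char) (f : Char → Int) (q : Char → Bool) :
    ((D.filterMap (fun k => if f k = 0 then none else some (k, f k))).filter
        (fun kv => q kv.1)).flatMap (fun kv => List.replicate kv.2.toNat kv.1)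
      = (D.filter (fun k => q k && decide (0 < f k))).flatMap
          (fun k => List.replicate (f k).toNat k) := by
  induction D with
  | nil => simp
  | cons k D ih =>
    by_cases h0 : f k = 0
    · have : ¬ (0 : Int) < f k := by omega
      simp [h0, ih, this]
    · by_cases hq : q k
      · by_cases hp : (0 : Int) < f k
        · simp [h0, hq, hp, ih]
        · have : (f k).toNat = 0 := by omega
          simp [h0, hq, hp, ih, this]
      · simp [h0, hq, ih]

theorem filter_flatMap_rep (K : List Char) (g : Char → Nat) (q : Char → Bool) :
    (K.flatMap (fun k => List.replicate (g k) k)).filter q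
      = (K.filter q).flatMap (fun k => List.replicate (g k) k) := by
  induction K with
  | nil => simp
  | cons k K ih =>
    by_cases h : q k <;>
      simp [List.filter_append, List.filter_replicate, h, ih]

theorem pairwise_flatMap_rep (K : List Char) (g : Char → Nat)
    (h : K.Pairwise (· ≤ ·)) :
    (K.flatMap (fun k => List.replicate (g k) k)).Pairwise (· ≤ ·) := by
  induction K with
  | nil => simp
  | cons k K ih =>
    rw [List.flatMap_cons, List.pairwise_append]
    refine ⟨List.pairwise_replicate.mpr (Or.inr le_rfl), ih h.of_cons, ?_⟩
    intro x hx y hy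
    obtain ⟨kk, hkk, hy2⟩ := List.mem_flatMap.mp hy
    rw [List.eq_of_mem_replicate hx, List.eq_of_mem_replicate hy2]
    exact (List.pairwise_cons.mp h).1 kk hkk

theorem take_countP_sorted (l : List Char) (q : Char → Bool)
    (hs : l.Pairwise (· ≤ ·)) (hdc : ∀ x y : Char, x ≤ y → q y = true → q x = true) :
    l.take (l.countP q) = l.filter q ∧ l.drop (l.countP q) = l.filter (fun c => !q c) := by
  induction l with
  | nil => simp
  | cons x l ih =>
    by_cases h : q x
    · have := ih hs.of_cons
      simp [List.countP_cons, h, this]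
    · have hall : ∀ y ∈ l, q y = false := by
        intro y hy
        by_contra hqy
        have : q y = true := by simpa using hqy
        exact h (hdc x y ((List.pairwise_cons.mp hs).1 y hy) this)
      have hfn : l.filter q = [] := by
        rw [List.filter_eq_nil_iff]
        intro a ha
        simp [hall a ha]
      have hcp : l.countP q = 0 := by
        rw [List.countP_eq_length_filter, hfn]
        rfl
      have hfa : l.filter (fun c => !q c) = l := by
        rw [List.filter_eq_self]
        intro a ha
        simp [hall a ha]
      simp [List.countP_cons, h, hcp, hfn, hfa]

theorem A_items_char (S P : List Char) (hsub : ∀ c ∈ P, c ∈ S) :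
    ((PySem.Dict.counter P).keys.foldl (fun d c =>
        if d.getD c 0 - (PySem.Dict.counter P).getD c 0 = 0 then d.erase c
        else d.insert c (d.getD c 0 - (PySem.Dict.counter P).getD c 0)) (PySem.Dict.counter S)).items
      = (PySem.Set.ofList S).filterMap (fun k =>
          if (S.count k : Int) - (P.count k : Int) = 0 then none
          else some (k, (S.count k : Int) - (P.count k : Int))) := by
  rw [sdA_items ((PySem.Dict.counter P).keys) (fun c => (PySem.Dict.counter P).getD c 0)
      (PySem.Dict.counter S) (PySem.Dict.nodup_keys_counter S)
      (by rw [PySem.Dict.keys_counter]; exact PySem.Set.nodup_ofList P)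
      (by
        intro c hc
        rw [PySem.Dict.keys_counter] at hc
        rw [PySem.Dict.contains_counter]
        exact List.contains_iff_mem.mpr (hsub c (by simpa using (PySem.Set.mem_ofList P c).mp hc)))]
  rw [PySem.Dict.items_counter, List.filterMap_map]
  apply List.filterMap_congr
  intro k hk
  have hkS : k ∈ S := by simpa using (PySem.Set.mem_ofList S k).mp hk
  simp only [Function.comp, PySem.Dict.keys_counter, PySem.Dict.getD_counter]
  by_cases hP : k ∈ P
  · simp [PySem.Set.mem_ofList, hP]
  · have h0 : P.count k = 0 := List.count_eq_zero.mpr hP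
    have hS : S.count k ≠ 0 := by
      have := List.count_pos_iff.mpr hkS
      omega
    simp [PySem.Set.mem_ofList, hP, h0]
    intro hcon
    exact absurd (by exact_mod_cast hcon) hS

theorem sorted_part (Dl : List Char) (f : Char → Int) (qb : Char → Bool) :
    PySem.List.sorted ((Dl.filter (fun k => qb k && decide (0 < f k))).flatMap
        (fun k => List.replicate (f k).toNat k)) (fun c => c) false
      = (((PySem.List.sorted Dl (fun c => c) false).filter (fun k => decide (0 < f k))).flatMap
          (fun k => List.replicate (f k).toNat k)).filter qb := by
  have hKperm : (PySem.List.sorted Dl (fun c => c) false).Perm Dl :=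
    PySem.List.sorted_perm Dl (fun c => c) false
  have hKpair : (PySem.List.sorted Dl (fun c => c) false).Pairwise (· ≤ ·) :=
    PySem.List.sorted_pairwise Dl (fun c => c)
  rw [filter_flatMap_rep, List.filter_filter]
  apply PySem.List.eq_of_perm_of_pairwise_le_of_injective (fun c => c) (fun a b h => h)
  · -- permutation
    refine (PySem.List.sorted_perm _ _ _).trans ?_
    exact ((hKperm.filter _).symm).flatMap (fun a _ => List.Perm.refl _)
  · exact PySem.List.sorted_pairwise _ _
  · exact pairwise_flatMap_rep _ _ (hKpair.sublist (List.filter_sublist))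

theorem preDel_foldl' (l : List (Char × Int)) (q : Char → Prop) [DecidablePred q]
    (a b : List Char) :
    l.foldl (fun (acc : List Char × List Char) kv =>
        if q kv.1 then (acc.1 ++ List.replicate kv.2.toNat kv.1, acc.2 ++ [kv.1]) else acc) (a, b)
      = (a ++ (l.filter (fun kv => decide (q kv.1))).flatMap (fun kv => List.replicate kv.2.toNat kv.1),
         b ++ (l.filter (fun kv => decide (q kv.1))).map (fun kv => kv.1)) := by
  induction l generalizing a b with
  | nil => simp
  | cons kv l ih =>
    by_cases h : q kv.1
    · simp only [List.foldl_cons, h, if_pos, ih, List.filter_cons, decide_true, List.flatMap_cons,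
        List.map_cons]
      simp [List.append_assoc, h]
    · simp [h, ih]

theorem branch_eq (S : List Char) (f : Char → Int) (pl : List Char) (qq : Char → Prop)
    [DecidablePred qq] (hdc : ∀ x y : Char, x ≤ y → qq y → qq x) :
    String.ofList (PySem.List.sorted (List.foldl (fun (acc : List Char × List Char) kv =>
          if qq kv.1 then (acc.1 ++ List.replicate kv.2.toNat kv.1, acc.2 ++ [kv.1]) else acc)
          ([], []) ((PySem.Set.ofList S).filterMap
            (fun k => if f k = 0 then none else some (k, f k)))).1 (fun c => c) false
        ++ pl ++
        PySem.List.sorted (List.foldl (fun acc kv => acc ++ List.replicate kv.2.toNat kv.1) []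
          (((PySem.Set.ofList S).filterMap (fun k => if f k = 0 then none else some (k, f k))).filter
            (fun kv => !((List.foldl (fun (acc : List Char × List Char) kv =>
                if qq kv.1 then (acc.1 ++ List.replicate kv.2.toNat kv.1, acc.2 ++ [kv.1]) else acc)
                ([], []) ((PySem.Set.ofList S).filterMap
                  (fun k => if f k = 0 then none else some (k, f k)))).2.contains kv.1))))
          (fun c => c) false)
      = String.ofList
          ((((PySem.List.sorted (PySem.Set.ofList S) (fun c => c) false).filter
              (fun k => decide (0 < f k))).flatMap (fun k => List.replicate (f k).toNat k)).take
            ((((PySem.List.sorted (PySem.Set.ofList S) (fun c => c) false).filter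
              (fun k => decide (0 < f k))).flatMap (fun k => List.replicate (f k).toNat k)).countP
              (fun c => decide (qq c)))
          ++ pl ++
          (((PySem.List.sorted (PySem.Set.ofList S) (fun c => c) false).filter
              (fun k => decide (0 < f k))).flatMap (fun k => List.replicate (f k).toNat k)).drop
            ((((PySem.List.sorted (PySem.Set.ofList S) (fun c => c) false).filter
              (fun k => decide (0 < f k))).flatMap (fun k => List.replicate (f k).toNat k)).countP
              (fun c => decide (qq c)))) := by
  have hpairK : (PySem.List.sorted (PySem.Set.ofList S) (fun c => c) false).Pairwise (· ≤ ·) :=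
    PySem.List.sorted_pairwise _ _
  have hpairrest : (((PySem.List.sorted (PySem.Set.ofList S) (fun c => c) false).filter
      (fun k => decide (0 < f k))).flatMap
        (fun k => List.replicate (f k).toNat k)).Pairwise (· ≤ ·) :=
    pairwise_flatMap_rep _ _ (hpairK.sublist (List.filter_sublist))
  have hqb : ∀ x y : Char, x ≤ y → decide (qq y) = true → decide (qq x) = true := by
    intro x y hxy hy
    simp only [decide_eq_true_eq] at *
    exact hdc x y hxy hy
  obtain ⟨htake, hdrop⟩ := take_countP_sorted _ (fun c => decide (qq c)) hpairrest hqb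
  rw [htake, hdrop]
  rw [preDel_foldl' _ qq [] []]
  dsimp only
  simp only [List.nil_append]
  have hdelcongr : (((PySem.Set.ofList S).filterMap
        (fun k => if f k = 0 then none else some (k, f k))).filter
      (fun kv => !((((PySem.Set.ofList S).filterMap
          (fun k => if f k = 0 then none else some (k, f k))).filter
            (fun kv => decide (qq kv.1))).map (fun kv => kv.1)).contains kv.1))
      = ((PySem.Set.ofList S).filterMap
          (fun k => if f k = 0 then none else some (k, f k))).filter
            (fun kv => !decide (qq kv.1)) := by
    apply List.filter_congr
    intro kv hkv
    suffices h : ((((PySem.Set.ofList S).filterMap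
        (fun k => if f k = 0 then none else some (k, f k))).filter
          (fun kv => decide (qq kv.1))).map (fun kv => kv.1)).contains kv.1 = decide (qq kv.1) by
      rw [h]
    by_cases hqq : qq kv.1
    · have hmem : kv.1 ∈ (((PySem.Set.ofList S).filterMap
          (fun k => if f k = 0 then none else some (k, f k))).filter
            (fun kv => decide (qq kv.1))).map (fun kv => kv.1) :=
        List.mem_map.mpr ⟨kv, List.mem_filter.mpr ⟨hkv, by simp [hqq]⟩, rfl⟩
      simp [hmem, hqq]
    · have hnmem : kv.1 ∉ (((PySem.Set.ofList S).filterMap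
          (fun k => if f k = 0 then none else some (k, f k))).filter
            (fun kv => decide (qq kv.1))).map (fun kv => kv.1) := by
        intro hmem
        obtain ⟨kv2, hkv2, he⟩ := List.mem_map.mp hmem
        have := (List.mem_filter.mp hkv2).2
        simp only [decide_eq_true_eq] at this
        exact hqq (he ▸ this)
      simp [hnmem, hqq]
  rw [hdelcongr]
  rw [PySem.List.foldl_append_eq_flatMap (fun kv : Char × Int => List.replicate kv.2.toNat kv.1)]
  simp only [List.nil_append]
  rw [expand_filterMap (PySem.Set.ofList S) f (fun c => decide (qq c)),
      expand_filterMap (PySem.Set.ofList S) f (fun c => !decide (qq c))]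
  rw [sorted_part (PySem.Set.ofList S) f (fun c => decide (qq c)),
      sorted_part (PySem.Set.ofList S) f (fun c => !decide (qq c))]

-- ----- B-side lemmas -----

theorem subSorted_sublist (fuel : Nat) : ∀ (x y : List Char), (subSorted fuel x y).Sublist x := by
  induction fuel with
  | zero => intro x y; cases x <;> simp [subSorted]
  | succ fuel ih =>
    intro x y
    cases x with
    | nil => simp [subSorted]
    | cons a x =>
      cases y with
      | nil =>
        simp only [subSorted]
        exact (ih x []).cons₂ a
      | cons b y =>
        simp only [subSorted]
        by_cases h1 : a = b
        · rw [if_pos h1]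
          exact (ih x y).trans (List.sublist_cons_self a x)
        · rw [if_neg h1]
          by_cases h2 : b < a
          · rw [if_pos h2]
            exact ih (a :: x) y
          · rw [if_neg h2]
            exact (ih x (b :: y)).cons₂ a

theorem subSorted_count (fuel : Nat) : ∀ (x y : List Char), x.length + y.length ≤ fuel →
    x.Pairwise (· ≤ ·) → y.Pairwise (· ≤ ·) →
    ∀ c, (subSorted fuel x y).count c = x.count c - y.count c := by
  induction fuel with
  | zero =>
    intro x y hf hx hy c
    cases x with
    | nil => simp [subSorted]
    | cons a x => simp at hf
  | succ fuel ih =>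
    intro x y hf hx hy c
    cases x with
    | nil => simp [subSorted]
    | cons a x =>
      cases y with
      | nil =>
        simp only [subSorted]
        have ht := ih x [] (by simp at hf ⊢; omega) hx.of_cons hy c
        simp [List.count_cons, ht]
      | cons b y =>
        simp only [subSorted]
        by_cases h1 : a = b
        · rw [if_pos h1]
          subst h1
          have ht := ih x y (by simp at hf ⊢; omega) hx.of_cons hy.of_cons c
          by_cases hc : c = a
          · subst hc
            have e1 : (c :: x).count c = x.count c + 1 := by simp [List.count_cons]
            have e2 : (c :: y).count c = y.count c + 1 := by simp [List.count_cons]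
            omega
          · have e1 : (a :: x).count c = x.count c := by simp [List.count_cons, Ne.symm hc]
            have e2 : (a :: y).count c = y.count c := by simp [List.count_cons, Ne.symm hc]
            rw [e1, e2, ht]
        · rw [if_neg h1]
          by_cases h2 : b < a
          · rw [if_pos h2]
            have ht := ih (a :: x) y (by simp at hf ⊢; omega) hx hy.of_cons c
            have hcount : (a :: x).count b = 0 := by
              rw [List.count_eq_zero]
              intro hmem
              rcases List.mem_cons.mp hmem with h | h
              · exact absurd h2 (by simp [h])
              · exact absurd (lt_of_lt_of_le h2 ((List.pairwise_cons.mp hx).1 b h)) (lt_irrefl b)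
            rw [ht]
            by_cases hc : c = b
            · subst hc
              have e1 : (c :: y).count c = y.count c + 1 := by simp [List.count_cons]
              omega
            · have e1 : (b :: y).count c = y.count c := by simp [List.count_cons, Ne.symm hc]
              rw [e1]
          · rw [if_neg h2]
            have ht := ih x (b :: y) (by simp at hf ⊢; omega) hx.of_cons hy c
            have hab : a < b := by
              rcases lt_trichotomy a b with h | h | h
              · exact h
              · exact absurd h h1
              · exact absurd h h2
            have hcount : (b :: y).count a = 0 := by
              rw [List.count_eq_zero]
              intro hmem
              rcases List.mem_cons.mp hmem with h | h
              · exact absurd hab (by simp [h])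
              · exact absurd (lt_of_lt_of_le hab ((List.pairwise_cons.mp hy).1 a h)) (lt_irrefl a)
            by_cases hc : c = a
            · subst hc
              have e1 : (b :: y).count c = 0 := hcount
              have e2 : (c :: subSorted fuel x (b :: y)).count c
                  = (subSorted fuel x (b :: y)).count c + 1 := by simp [List.count_cons]
              have e3 : (c :: x).count c = x.count c + 1 := by simp [List.count_cons]
              omega
            · have e2 : (a :: subSorted fuel x (b :: y)).count c
                  = (subSorted fuel x (b :: y)).count c := by simp [List.count_cons, Ne.symm hc]
              have e3 : (a :: x).count c = x.count c := by simp [List.count_cons, Ne.symm hc]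
              rw [e2, e3, ht]

theorem count_flatMap_rep (K : List Char) (g : Char → Nat) (hnd : K.Nodup) (c : Char) :
    (K.flatMap (fun k => List.replicate (g k) k)).count c = if c ∈ K then g c else 0 := by
  induction K with
  | nil => simp
  | cons k K ih =>
    have hk : k ∉ K := (List.nodup_cons.mp hnd).1
    rw [List.flatMap_cons, List.count_append, ih (List.nodup_cons.mp hnd).2]
    by_cases hc : c = k
    · subst hc
      simp [List.count_replicate, hk]
    · simp [List.count_replicate, hc, Ne.symm hc]


theorem restOf_count (S P : List Char) (c : Char) :
    (restOf S P).count c = S.count c - P.count c := by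
  unfold restOf
  have hnd : ((PySem.List.sorted (PySem.Set.ofList S) (fun c => c) false).filter
      (fun k => decide (0 < (S.count k : Int) - (P.count k : Int)))).Nodup :=
    ((PySem.List.sorted_perm _ _ _).nodup_iff.mpr (PySem.Set.nodup_ofList S)).filter _
  rw [count_flatMap_rep _ _ hnd]
  by_cases hmem : c ∈ S
  · have hin : c ∈ PySem.List.sorted (PySem.Set.ofList S) (fun c => c) false := by
      rw [PySem.List.mem_sorted]
      exact (PySem.Set.mem_ofList S c).mpr hmem
    by_cases hpos : (0 : Int) < (S.count c : Int) - (P.count c : Int)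
    · rw [if_pos (List.mem_filter.mpr ⟨hin, by simpa using hpos⟩)]
      omega
    · rw [if_neg (fun hmf => hpos (by simpa using (List.mem_filter.mp hmf).2))]
      omega
  · rw [if_neg (fun hmf => hmem (by
      simpa using (PySem.Set.mem_ofList S c).mp ((PySem.List.mem_sorted _ _ _ _).mp (List.mem_filter.mp hmf).1)))]
    rw [List.count_eq_zero.mpr hmem]
    omega


theorem restOf_pairwise (S P : List Char) : (restOf S P).Pairwise (· ≤ ·) := by
  exact pairwise_flatMap_rep _ _ ((PySem.List.sorted_pairwise _ _).sublist List.filter_sublist)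

theorem subSorted_sorted_eq_restOf (S P : List Char) :
    subSorted ((PySem.List.sorted S (fun c => c) false).length
        + (PySem.List.sorted P (fun c => c) false).length)
      (PySem.List.sorted S (fun c => c) false) (PySem.List.sorted P (fun c => c) false)
      = restOf S P := by
  have hperm : (subSorted ((PySem.List.sorted S (fun c => c) false).length
      + (PySem.List.sorted P (fun c => c) false).length)
      (PySem.List.sorted S (fun c => c) false)
      (PySem.List.sorted P (fun c => c) false)).Perm (restOf S P) := by
    rw [List.perm_iff_count]
    intro c
    rw [subSorted_count _ _ _ le_rfl (PySem.List.sorted_pairwise _ _)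
          (PySem.List.sorted_pairwise _ _),
        restOf_count,
        (PySem.List.sorted_perm S (fun c => c) false).count_eq,
        (PySem.List.sorted_perm P (fun c => c) false).count_eq]
  exact PySem.List.eq_of_perm_of_pairwise_le_of_injective (fun c => c) (fun a b h => h) hperm
    ((PySem.List.sorted_pairwise _ _).sublist (subSorted_sublist _ _ _))
    (restOf_pairwise S P)

theorem strGe_mn_aux (p0 : Char) (tl : List Char) :
    strGe tl (List.replicate tl.length p0) = mnLoop p0 tl := by
  induction tl generalizing p0 with
  | nil => rfl
  | cons c tl ih =>
    show strGe (c :: tl) (p0 :: List.replicate tl.length p0) = _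
    by_cases h : c = p0
    · subst h
      show (if c = c then strGe tl (List.replicate tl.length c) else _) = _
      rw [if_pos rfl, ih c]
      show _ = if c.toNat = c.toNat then mnLoop c tl else _
      rw [if_pos rfl]
    · have hn : ¬ c.toNat = p0.toNat := fun hh => h (Char.ext (UInt32.toNat_inj.mp hh))
      show (if c = p0 then _ else decide (p0 < c)) = _
      rw [if_neg h]
      show _ = if c.toNat = p0.toNat then _ else if c.toNat < p0.toNat then false else true
      rw [if_neg hn]
      by_cases hlt : c.toNat < p0.toNat
      · have : ¬ p0 < c := by
          intro hpc
          have : p0.toNat < c.toNat := hpc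
          omega
        simp [hlt, this]
      · have : p0 < c := by
          have : p0.toNat < c.toNat := by omega
          exact this
        simp [hlt, this]


theorem strGe_mn (p0 : Char) (tl : List Char) :
    strGe (p0 :: tl) (List.replicate (p0 :: tl).length p0) = mnLoop p0 tl := by
  show strGe (p0 :: tl) (p0 :: List.replicate tl.length p0) = _
  show (if p0 = p0 then strGe tl (List.replicate tl.length p0) else _) = _
  rw [if_pos rfl, strGe_mn_aux]

theorem bsLoop_inv (rest : List Char) (key : Char) (mn : Bool)
    (q : Char → Bool) (hq : ∀ c, q c = (c < key || (mn && c == key)))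
    (hq1 : ∀ (i : Nat) (h : i < rest.length), i < rest.countP q → q rest[i] = true)
    (hq2 : ∀ (i : Nat) (h : i < rest.length), rest.countP q ≤ i → q rest[i] = false) :
    ∀ (fuel lo hi : Nat), hi - lo ≤ fuel →
      lo ≤ rest.countP q → rest.countP q ≤ hi → hi ≤ rest.length →
      bsLoop rest key mn fuel lo hi = rest.countP q := by
  intro fuel
  induction fuel with
  | zero =>
    intro lo hi hf h1 h2 h3
    simp only [bsLoop]
    omega
  | succ fuel ih =>
    intro lo hi hf h1 h2 h3
    simp only [bsLoop]
    by_cases hlh : lo < hi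
    · rw [if_pos hlh]
      by_cases htest : (rest.getD ((lo + hi) / 2) ' ' < key
          || (mn && rest.getD ((lo + hi) / 2) ' ' == key)) = true
      · rw [if_pos htest]
        refine ih ((lo + hi) / 2 + 1) hi (by omega) ?_ h2 h3
        have hmidlen : (lo + hi) / 2 < rest.length := by omega
        by_contra hcon
        have hle : rest.countP q ≤ (lo + hi) / 2 := by omega
        have hfalse := hq2 ((lo + hi) / 2) hmidlen hle
        rw [List.getD_eq_getElem rest ' ' hmidlen, ← hq] at htest
        rw [htest] at hfalse
        cases hfalse
      · rw [if_neg htest]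
        have hmidlen : (lo + hi) / 2 < rest.length := by omega
        refine ih lo ((lo + hi) / 2) (by omega) h1 ?_ (by omega)
        by_contra hcon
        have hlt : (lo + hi) / 2 < rest.countP q := by omega
        have htrue := hq1 ((lo + hi) / 2) hmidlen hlt
        rw [List.getD_eq_getElem rest ' ' hmidlen, ← hq] at htest
        exact htest htrue
    · rw [if_neg hlh]
      omega

theorem bsLoop_eq_countP (rest : List Char) (key : Char) (mn : Bool)
    (hs : rest.Pairwise (· ≤ ·))
    (hdc : ∀ x y : Char, x ≤ y → (y < key || (mn && y == key)) = true
      → (x < key || (mn && x == key)) = true) :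
    bsLoop rest key mn rest.length 0 rest.length
      = rest.countP (fun c => c < key || (mn && c == key)) := by
  have hN : rest.countP (fun c => c < key || (mn && c == key)) ≤ rest.length :=
    List.countP_le_length
  obtain ⟨htake, hdrop⟩ := take_countP_sorted rest (fun c => c < key || (mn && c == key)) hs hdc
  refine bsLoop_inv rest key mn _ (fun c => rfl) ?_ ?_ rest.length 0 rest.length (by omega)
    (Nat.zero_le _) hN le_rfl
  · intro i hlen hi
    have hlt : i < (rest.take (rest.countP (fun c => c < key || (mn && c == key)))).length := by
      rw [List.length_take]; omega
    have hmem : rest[i] ∈ rest.take (rest.countP (fun c => c < key || (mn && c == key))) := by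
      have h := List.getElem_mem hlt
      rwa [List.getElem_take] at h
    rw [htake] at hmem
    exact (List.mem_filter.mp hmem).2
  · intro i hlen hi
    have hlt : i - rest.countP (fun c => c < key || (mn && c == key))
        < (rest.drop (rest.countP (fun c => c < key || (mn && c == key)))).length := by
      rw [List.length_drop]; omega
    have hmem : rest[i] ∈ rest.drop (rest.countP (fun c => c < key || (mn && c == key))) := by
      have h := List.getElem_mem hlt
      rw [List.getElem_drop] at h
      have hidx : rest.countP (fun c => c < key || (mn && c == key))
          + (i - rest.countP (fun c => c < key || (mn && c == key))) = i := by omega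
      simp only [hidx] at h
      exact h
    rw [hdrop] at hmem
    have hb := (List.mem_filter.mp hmem).2
    simp only [Bool.not_eq_true'] at hb
    exact hb

theorem pred_eq (key c : Char) (mn : Bool) :
    (c < key || (mn && c == key))
      = (if mn then decide (c.toNat ≤ key.toNat) else decide (c.toNat < key.toNat)) := by
  have hlt : (c < key) = decide (c.toNat < key.toNat) := by
    by_cases h : c < key
    · have : c.toNat < key.toNat := h
      simp [h, this]
    · have : ¬ c.toNat < key.toNat := fun hh => h hh
      simp [h, this]
  cases mn with
  | false => simp [hlt]
  | true =>
    simp only [Bool.true_and, if_pos]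
    by_cases he : c = key
    · subst he; simp
    · have : (c == key) = false := by simp [he]
      rw [this]
      have hne : ¬ c.toNat = key.toNat := fun hh => he (Char.ext (UInt32.toNat_inj.mp hh))
      by_cases h : c < key
      · have h1 : c.toNat < key.toNat := h
        simp [h, h1, Nat.le_of_lt h1]
      · have h1 : ¬ c.toNat < key.toNat := fun hh => h hh
        have h2 : ¬ c.toNat ≤ key.toNat := by omega
        simp [h, h2]


theorem main_eq (s p : String) (hsub : ∀ c ∈ p.toList, c ∈ s.toList)
    (hemp : p.toList = [] → s.toList = []) : solve s p = solve_alt s p := by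
  have hpreS : preDict s = PySem.Dict.counter s.toList := by
    rw [preDict]
    exact PySem.Dict.foldl_insert_getD_add_one_eq_counter s.toList
  have hpreP : preDict p = PySem.Dict.counter p.toList := by
    rw [preDict]
    exact PySem.Dict.foldl_insert_getD_add_one_eq_counter p.toList
  simp only [solve, solve_alt, hpreS, hpreP]
  rw [eraseFold_items, A_items_char s.toList p.toList hsub]
  rw [subSorted_sorted_eq_restOf s.toList p.toList]
  by_cases hIA : (PySem.Set.ofList s.toList).filterMap (fun k =>
      if ((s.toList.count k : Int)) - ((p.toList.count k : Int)) = 0 then none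
      else some (k, ((s.toList.count k : Int)) - ((p.toList.count k : Int)))) = []
  · rw [if_pos hIA]
    have hf0 : ∀ k ∈ PySem.Set.ofList s.toList,
        ((s.toList.count k : Int)) - (p.toList.count k : Int) = 0 := by
      intro k hk
      have h1 := List.forall_none_of_filterMap_eq_nil hIA k hk
      by_contra hne
      simp [hne] at h1
    have hre : restOf s.toList p.toList = [] := by
      unfold restOf
      have hfe : (PySem.List.sorted (PySem.Set.ofList s.toList) (fun c => c) false).filter
          (fun k => decide (0 < (s.toList.count k : Int) - (p.toList.count k : Int))) = [] := by
        rw [List.filter_eq_nil_iff]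
        intro k hk
        have h0 := hf0 k ((PySem.List.sorted_perm _ _ _).subset hk)
        simp [h0]
      rw [hfe]
      rfl
    rw [if_pos hre]
  · rw [if_neg hIA]
    have hPne : p.toList ≠ [] := by
      intro h0
      apply hIA
      rw [hemp h0, h0]
      rfl
    obtain ⟨p0, tl, hP⟩ := List.exists_cons_of_ne_nil hPne
    rw [hP]
    simp only [List.headD_cons]
    rw [strGe_mn p0 tl]
    have hfold : (((PySem.List.sorted (PySem.Set.ofList s.toList) (fun c => c) false).filter
        (fun k => decide (0 < (s.toList.count k : Int) - ((p0 :: tl).count k : Int)))).flatMap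
        (fun k => List.replicate ((s.toList.count k : Int) - ((p0 :: tl).count k : Int)).toNat k))
        = restOf s.toList (p0 :: tl) := rfl
    have hc2n : ∀ x y : Char, x ≤ y → x.toNat ≤ y.toNat := fun x y h => Fin.mk_le_mk.mp h
    by_cases hb : mnLoop p0 tl = true
    · simp only [hb, if_true]
      rw [branch_eq s.toList (fun k => (s.toList.count k : Int) - ((p0 :: tl).count k : Int))
          (p0 :: tl) (fun c => c.toNat ≤ p0.toNat)
          (fun x y hxy hy => le_trans (hc2n x y hxy) hy)]
      by_cases hr : restOf s.toList (p0 :: tl) = []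
      · rw [if_pos hr, hfold, hr]
        simp only [List.take_nil, List.drop_nil, List.append_nil, List.nil_append]
        rw [← hP, String.ofList_toList]
      · rw [if_neg hr, hfold]
        have hdcT : ∀ x y : Char, x ≤ y → (y < p0 || (true && y == p0)) = true
            → (x < p0 || (true && x == p0)) = true := by
          intro x y hxy hy
          have hyy : y.toNat ≤ p0.toNat := by
            rw [pred_eq] at hy
            simpa using hy
          rw [pred_eq]
          simpa using le_trans (hc2n x y hxy) hyy
        rw [bsLoop_eq_countP (restOf s.toList (p0 :: tl)) p0 true (restOf_pairwise _ _) hdcT]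
        have hcp : (fun c : Char => (c < p0 || (true && c == p0)))
            = (fun c : Char => decide (c.toNat ≤ p0.toNat)) := by
          funext c
          rw [pred_eq]
          simp
        rw [hcp]
    · rw [Bool.not_eq_true] at hb
      simp only [hb, Bool.false_eq_true, if_false]
      rw [branch_eq s.toList (fun k => (s.toList.count k : Int) - ((p0 :: tl).count k : Int))
          (p0 :: tl) (fun c => c.toNat < p0.toNat)
          (fun x y hxy hy => lt_of_le_of_lt (hc2n x y hxy) hy)]
      by_cases hr : restOf s.toList (p0 :: tl) = []
      · rw [if_pos hr, hfold, hr]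
        simp only [List.take_nil, List.drop_nil, List.append_nil, List.nil_append]
        rw [← hP, String.ofList_toList]
      · rw [if_neg hr, hfold]
        have hdcF : ∀ x y : Char, x ≤ y → (y < p0 || (false && y == p0)) = true
            → (x < p0 || (false && x == p0)) = true := by
          intro x y hxy hy
          have hyy : y.toNat < p0.toNat := by
            rw [pred_eq] at hy
            simpa using hy
          rw [pred_eq]
          simpa using lt_of_le_of_lt (hc2n x y hxy) hyy
        rw [bsLoop_eq_countP (restOf s.toList (p0 :: tl)) p0 false (restOf_pairwise _ _) hdcF]
        have hcp : (fun c : Char => (c < p0 || (false && c == p0)))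
            = (fun c : Char => decide (c.toNat < p0.toNat)) := by
          funext c
          rw [pred_eq]
          simp
        rw [hcp]

-- ===== VERDICT (by name: the statement is the Claim_ definition above) =====
theorem solve_spec : Claim_equal_solve := by
  unfold Claim_equal_solve Spec_solve
  intro s p _ hpre
  obtain ⟨hall, hemp⟩ := hpre
  refine main_eq s p (fun c hc => ?_) hemp
  have h1 := List.all_eq_true.mp hall c hc
  simpa using h1
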